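-- pv_equiv track=rewrite | github.com/gdsfactory/skywater130 | sky130/routing_utils.py | _has_local_backtrack_corners
-- ===== SOURCE A (Python) =====
-- from typing import Dict, Iterable, List, Optional, Sequence, Tuple
--
-- def _has_local_backtrack_corners(corners_3d: List[Tuple[int, int, int]]) -> bool:
--     """Detect immediate A->B->A position reversals."""
--     if len(corners_3d) < 3:
--         return False
--     for i in range(1, len(corners_3d) - 1):
--         a = corners_3d[i - 1]
--         b = corners_3d[i]
--         c = corners_3d[i + 1]
--         if a[0] == c[0] and a[1] == c[1] and not (a[0] == b[0] and a[1] == b[1]):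
--             return True
--     return False
-- ===== SOURCE B (Python) =====
-- from typing import List, Tuple
--
-- def _has_local_backtrack_corners(corners_3d: List[Tuple[int, int, int]]) -> bool:
--     """Detect immediate A->B->A reversals via run-length encoding of the 2D track.
--
--     A visits B and immediately returns to A exactly when, after run-length
--     compressing the 2D projections of the corners, some interior run has
--     length 1 and its two neighbouring runs carry the same 2D value.
--     """
--     pts = [(x, y) for x, y, _ in corners_3d]
--     runs = []  # (2D value, run length), left to right
--     i = 0
--     n = len(pts)
--     while i < n:
--         j = i
--         while j < n and pts[j] == pts[i]:
--             j += 1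
--         runs.append((pts[i], j - i))
--         i = j
--     return any(m[1] == 1 and p[0] == q[0]
--                for p, m, q in zip(runs, runs[1:], runs[2:]))
-- ===== Notes on version B (the rewrite author's own statement) =====
-- stated objective: alternative
-- what changed: B run-length-encodes the 2D projections of the corners into (value, length) runs and reports a backtrack iff some interior run has length 1 with equal neighbouring run values, replacing A's sliding triple-window scan over raw corners.
import Mathlib
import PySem

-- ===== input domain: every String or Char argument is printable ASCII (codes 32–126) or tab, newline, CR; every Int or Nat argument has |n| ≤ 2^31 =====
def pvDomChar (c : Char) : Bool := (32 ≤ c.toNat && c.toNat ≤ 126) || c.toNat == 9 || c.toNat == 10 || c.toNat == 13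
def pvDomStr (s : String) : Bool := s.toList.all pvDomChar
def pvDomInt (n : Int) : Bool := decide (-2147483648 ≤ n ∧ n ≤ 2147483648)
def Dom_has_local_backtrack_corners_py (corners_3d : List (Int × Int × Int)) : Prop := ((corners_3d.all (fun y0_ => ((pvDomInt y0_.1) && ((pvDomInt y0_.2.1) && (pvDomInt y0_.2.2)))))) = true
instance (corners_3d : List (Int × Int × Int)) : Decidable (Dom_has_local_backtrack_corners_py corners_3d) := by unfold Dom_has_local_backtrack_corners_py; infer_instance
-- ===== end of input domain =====

-- B run-length-encodes the 2D projections into runs and looks for a length-1 interior run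
-- flanked by equal values, instead of A's triple-window scan (alternative algorithm, same O(n)).

-- ===== PORT A =====
-- the for-loop over i in range(1, len-1), sliding the (a,b,c) window
def pvALoop : List (Int × Int × Int) → Bool
  | a :: b :: c :: rest =>
      if a.1 = c.1 ∧ a.2.1 = c.2.1 ∧ ¬ (a.1 = b.1 ∧ a.2.1 = b.2.1) then true
      else pvALoop (b :: c :: rest)
  | _ => false

def has_local_backtrack_corners_py (corners_3d : List (Int × Int × Int)) : Bool :=
  if corners_3d.length < 3 then false
  else pvALoop corners_3d

-- ===== PORT B =====
-- inner while loop: length of the leading run equal to v, and the remaining suffix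
def pvRunSplit (v : Int × Int) : List (Int × Int) → Nat × List (Int × Int)
  | [] => (0, [])
  | u :: t =>
      if u = v then
        let r := pvRunSplit v t
        (r.1 + 1, r.2)
      else (0, u :: t)

lemma pvRunSplit_len (v : Int × Int) : ∀ t : List (Int × Int), (pvRunSplit v t).2.length ≤ t.length := by
  intro t
  induction t with
  | nil => simp [pvRunSplit]
  | cons u t ih =>
    simp only [pvRunSplit]
    split
    · exact Nat.le_trans ih (Nat.le_succ _)
    · simp

-- outer while loop: collect (value, run length) runs left to right
def pvRuns : List (Int × Int) → List ((Int × Int) × Nat)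
  | [] => []
  | v :: t => (v, (pvRunSplit v t).1 + 1) :: pvRuns (pvRunSplit v t).2
termination_by l => l.length
decreasing_by
  exact Nat.lt_succ_of_le (pvRunSplit_len v t)

-- any(m[1] == 1 and p[0] == q[0] for p, m, q in zip(runs, runs[1:], runs[2:]))
def pvScan : List ((Int × Int) × Nat) → Bool
  | p :: m :: q :: rest =>
      (decide (m.2 = 1) && decide (p.1 = q.1)) || pvScan (m :: q :: rest)
  | _ => false

def has_local_backtrack_corners_py_alt (corners_3d : List (Int × Int × Int)) : Bool :=
  pvScan (pvRuns (corners_3d.map (fun p => (p.1, p.2.1))))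

-- ===== PRECONDITION & SPEC =====
def Spec_has_local_backtrack_corners_py (corners_3d : List (Int × Int × Int)) (out : Bool) : Prop := out = has_local_backtrack_corners_py_alt corners_3d
instance (corners_3d : List (Int × Int × Int)) (out : Bool) : Decidable (Spec_has_local_backtrack_corners_py corners_3d out) := by unfold Spec_has_local_backtrack_corners_py; infer_instance

-- ===== CLAIM (what is proved, stated in full; the proofs are below) =====
def Claim_equal_has_local_backtrack_corners_py : Prop := ∀ (corners_3d : List (Int × Int × Int)), Dom_has_local_backtrack_corners_py corners_3d → Spec_has_local_backtrack_corners_py corners_3d (has_local_backtrack_corners_py corners_3d)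

-- ===== LEMMAS AND PROOFS =====

-- window scan of A, phrased over 2D points
def pvW : List (Int × Int) → Bool
  | a :: b :: c :: rest =>
      (decide (a = c) && !decide (a = b)) || pvW (b :: c :: rest)
  | _ => false

lemma pvALoop_eq_pvW : ∀ xs : List (Int × Int × Int),
    pvALoop xs = pvW (xs.map (fun p => (p.1, p.2.1))) := by
  intro xs
  induction xs with
  | nil => rfl
  | cons a ys ih =>
    cases ys with
    | nil => rfl
    | cons b zs =>
      cases zs with
      | nil => rfl
      | cons c ws =>
        simp only [pvALoop, pvW, List.map_cons] at *
        rw [ih]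
        by_cases h : a.1 = c.1 ∧ a.2.1 = c.2.1 ∧ ¬ (a.1 = b.1 ∧ a.2.1 = b.2.1)
        · rw [if_pos h]
          symm
          simp only [Bool.or_eq_true, Bool.and_eq_true, decide_eq_true_eq,
            Bool.not_eq_true', decide_eq_false_iff_not, Prod.mk.injEq]
          exact Or.inl ⟨⟨h.1, h.2.1⟩, h.2.2⟩
        · rw [if_neg h]
          have hf : (decide (((a.1, a.2.1) : Int × Int) = (c.1, c.2.1)) &&
              !decide (((a.1, a.2.1) : Int × Int) = (b.1, b.2.1))) = false := by
            simp only [Bool.and_eq_false_iff, decide_eq_false_iff_not,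
              Bool.not_eq_false', decide_eq_true_eq, Prod.mk.injEq]
            tauto
          rw [hf, Bool.false_or]

-- pvScan never reads the first run's length
lemma pvScan_head (v : Int × Int) (a b : Nat) (rs : List ((Int × Int) × Nat)) :
    pvScan ((v, a) :: rs) = pvScan ((v, b) :: rs) := by
  cases rs with
  | nil => rfl
  | cons m t =>
    cases t with
    | nil => rfl
    | cons q r => rfl

-- a middle run of length ≥ 2 can be dropped as window head
lemma pvScan_ge2 (p : (Int × Int) × Nat) (u : Int × Int) (k : Nat)
    (rs : List ((Int × Int) × Nat)) :
    pvScan (p :: (u, k + 2) :: rs) = pvScan ((u, k + 2) :: rs) := by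
  cases rs with
  | nil => rfl
  | cons q r =>
    simp [pvScan]

lemma pvW_dup (v : Int × Int) (t : List (Int × Int)) :
    pvW (v :: v :: t) = pvW (v :: t) := by
  cases t with
  | nil => rfl
  | cons c r => simp [pvW]

-- main lemma: A's window scan equals B's run-length scan
lemma pvMain : ∀ ys : List (Int × Int), pvW ys = pvScan (pvRuns ys)
  | [] => by simp [pvW, pvRuns, pvScan]
  | [v] => by simp [pvW, pvRuns, pvRunSplit, pvScan]
  | v :: u :: t => by
    by_cases h : u = v
    · subst h
      rw [pvW_dup, pvMain (u :: t)]
      simp only [pvRuns, pvRunSplit]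
      exact (pvScan_head u _ _ _).symm
    · cases t with
      | nil =>
        simp [pvW, pvRuns, pvRunSplit, h]
        rfl
      | cons c r =>
        have hrec := pvMain (u :: c :: r)
        by_cases hc : c = u
        · subst hc
          -- v followed by a run of c of length ≥ 2: the window head v is irrelevant
          have hW : pvW (v :: c :: c :: r) = pvW (c :: c :: r) := by
            have hvc : ¬ ((v : Int × Int) = c) := fun e => h e.symm
            simp [pvW, hvc]
          rw [hW, hrec]
          simp only [pvRuns, pvRunSplit, if_neg h]
          exact (pvScan_ge2 _ c _ _).symm
        · -- distinct v, u, then c: runs start (v,1) :: (u,1) :: runs (c :: r)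
          have hW : pvW (v :: u :: c :: r) =
              (decide ((v : Int × Int) = c) || pvW (u :: c :: r)) := by
            have hvu : ¬ ((v : Int × Int) = u) := fun e => h e.symm
            simp [pvW, hvu]
          rw [hW, hrec]
          simp only [pvRuns, pvRunSplit, if_neg h, if_neg hc]
          cases r with
          | nil => simp [pvScan]
          | cons d r' => simp [pvScan]
termination_by ys => ys.length
decreasing_by
  · simp
  · simp

-- ===== VERDICT (by name: the statement is the Claim_ definition above) =====
theorem has_local_backtrack_corners_py_spec : Claim_equal_has_local_backtrack_corners_py := by
  intro xs _
  unfold Spec_has_local_backtrack_corners_py has_local_backtrack_corners_py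
  have hmain : pvALoop xs = has_local_backtrack_corners_py_alt xs := by
    rw [pvALoop_eq_pvW, has_local_backtrack_corners_py_alt, pvMain]
  split
  · rename_i h
    match xs, h with
    | [], _ => exact hmain
    | [_], _ => exact hmain
    | [_, _], _ => exact hmain
  · exact hmain
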